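-- pv_equiv track=rewrite | github.com/sil-ai/aqua-api | assessments/semantic-similarity/prepare_semsim_data.py | pop_between_verses
-- ===== SOURCE A (Python) =====
-- def pop_between_verses(start_of_range):
--     #get all in between verses
--     to_pop = []
--     for idx in range(1,len(start_of_range)):
--         if start_of_range[idx] - start_of_range[idx-1] == 1:
--             to_pop.append(start_of_range[idx])
--
--     #pop the in between verses
--     for popper in reversed(to_pop):
--         start_of_range.pop(start_of_range.index(popper))
--     return start_of_range
-- ===== SOURCE B (Python) =====
-- def pop_between_verses(start_of_range):
--     # Count, per value, how many occurrences must be removed.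
--     counts = {}
--     prev = None
--     for v in start_of_range:
--         if prev is not None and v - prev == 1:
--             counts[v] = counts.get(v, 0) + 1
--         prev = v
--
--     # One forward pass: skip the first counts[v] occurrences of each value v.
--     kept = []
--     for v in start_of_range:
--         if counts.get(v, 0) > 0:
--             counts[v] -= 1
--         else:
--             kept.append(v)
--     start_of_range[:] = kept
--     return start_of_range
-- ===== Notes on version B (the rewrite author's own statement) =====
-- stated objective: alternative
-- what changed: Replaces the collect-then-repeatedly-.index/.pop loop by a count table built in one pass plus a single forward filtering pass that skips the first k_v occurrences of each marked value; same in-place mutation via slice assignment.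
import Mathlib
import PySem

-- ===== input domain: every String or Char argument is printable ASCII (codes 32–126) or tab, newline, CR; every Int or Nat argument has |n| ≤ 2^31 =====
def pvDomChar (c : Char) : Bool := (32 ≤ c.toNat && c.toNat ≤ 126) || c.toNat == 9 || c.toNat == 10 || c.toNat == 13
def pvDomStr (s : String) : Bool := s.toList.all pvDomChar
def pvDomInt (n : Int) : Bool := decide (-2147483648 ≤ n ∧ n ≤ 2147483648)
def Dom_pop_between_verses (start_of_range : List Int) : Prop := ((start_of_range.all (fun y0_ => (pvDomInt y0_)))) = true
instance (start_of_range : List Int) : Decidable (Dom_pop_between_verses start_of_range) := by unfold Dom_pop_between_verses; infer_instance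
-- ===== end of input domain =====

-- B replaces A's repeated .index/.pop scans by one count table and one forward filtering pass.
-- The equivalence is about the RETURN value — both Pythons also mutate the list in place to
-- that same value, A by pops, B by slice assignment.

-- ===== PORT A =====
def pop_between_verses (start_of_range : List Int) : List Int :=
  -- to_pop: for idx in range(1, len): if l[idx] - l[idx-1] == 1: to_pop.append(l[idx])
  -- (indices idx and idx-1 are always in range, so pyGetD with default 0 is exact here)
  let to_pop : List Int :=
    (PySem.List.pyRange 1 (start_of_range.length : Int) 1).foldl
      (fun acc idx =>
        if PySem.List.pyGetD start_of_range idx 0 -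
            PySem.List.pyGetD start_of_range (idx - 1) 0 = 1 then
          acc ++ [PySem.List.pyGetD start_of_range idx 0]
        else acc) []
  -- for popper in reversed(to_pop): l.pop(l.index(popper))
  to_pop.reverse.foldl
    (fun cur popper =>
      match PySem.List.index? cur popper with
      | some i =>
        match PySem.List.pop? cur (i : Int) with
        | some r => r.2
        | none => cur      -- unreachable: index? returns an in-range index
      | none => cur)       -- Python would raise ValueError; unreachable: popper ∈ cur
    start_of_range

-- ===== PORT B =====
def pop_between_verses_alt (start_of_range : List Int) : List Int :=
  -- counts = {}; prev = None; for v in l: if prev is not None and v - prev == 1: counts[v] += 1; prev = v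
  let st :=
    start_of_range.foldl
      (fun (s : PySem.Dict Int Int × Option Int) v =>
        let counts :=
          match s.2 with
          | some p => if v - p = 1 then s.1.insert v (s.1.getD v 0 + 1) else s.1
          | none => s.1
        (counts, some v))
      (PySem.Dict.empty, none)
  -- kept = []; for v in l: if counts.get(v,0) > 0: counts[v] -= 1 else kept.append(v)
  let res :=
    start_of_range.foldl
      (fun (s : PySem.Dict Int Int × List Int) v =>
        if s.1.getD v 0 > 0 then (s.1.insert v (s.1.getD v 0 - 1), s.2)
        else (s.1, s.2 ++ [v]))
      (st.1, [])
  res.2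

-- ===== PRECONDITION & SPEC =====
def Spec_pop_between_verses (start_of_range : List Int) (out : List Int) : Prop := out = pop_between_verses_alt start_of_range
instance (start_of_range : List Int) (out : List Int) : Decidable (Spec_pop_between_verses start_of_range out) := by unfold Spec_pop_between_verses; infer_instance

-- ===== CLAIM (what is proved, stated in full; the proofs are below) =====
def Claim_equal_pop_between_verses : Prop := ∀ (start_of_range : List Int), Dom_pop_between_verses start_of_range → Spec_pop_between_verses start_of_range (pop_between_verses start_of_range)

-- ===== LEMMAS AND PROOFS =====

-- canonical list of marked ("in-between") values, in order
def pvGo (prev : Int) : List Int → List Int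
  | [] => []
  | v :: t => (if v - prev = 1 then [v] else []) ++ pvGo v t

def pvMk : List Int → List Int
  | [] => []
  | a :: t => pvGo a t

-- spec-level second pass: skip the first (c v) occurrences of each v
def pvPass (c : Int → Int) : List Int → List Int
  | [] => []
  | v :: t => if c v > 0 then pvPass (fun x => if x = v then c x - 1 else c x) t
              else v :: pvPass c t

theorem pvGo_sublist (prev : Int) (t : List Int) : (pvGo prev t).Sublist t := by
  induction t generalizing prev with
  | nil => simp [pvGo]
  | cons v t ih =>
    simp only [pvGo]
    split
    · simpa using (ih v).cons₂ v
    · simpa using (ih v).cons v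

theorem pvMk_count_le (l : List Int) (v : Int) : (pvMk l).count v ≤ l.count v := by
  cases l with
  | nil => simp [pvMk]
  | cons a t =>
    simp only [pvMk]
    calc (pvGo a t).count v ≤ t.count v := (pvGo_sublist a t).count_le v
    _ ≤ (a :: t).count v := (List.sublist_cons_self a t).count_le v

theorem pvPass_congr (l : List Int) (c c' : Int → Int) (h : ∀ v, c v = c' v) :
    pvPass c l = pvPass c' l := by
  induction l generalizing c c' with
  | nil => rfl
  | cons v t ih =>
    simp only [pvPass, h v]
    split
    · exact ih _ _ (fun x => by by_cases hx : x = v <;> simp [hx, h])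
    · rw [ih _ _ h]

theorem pvPass_zero (l : List Int) (c : Int → Int) (h : ∀ v, c v = 0) :
    pvPass c l = l := by
  induction l generalizing c with
  | nil => rfl
  | cons v t ih =>
    simp only [pvPass, h v]
    norm_num
    exact ih _ h

theorem pvPass_inc (l : List Int) (c : Int → Int) (p : Int) (hp : p ∈ l) (hc : 0 ≤ c p) :
    pvPass (fun v => if v = p then c v + 1 else c v) l = pvPass c (l.erase p) := by
  induction l generalizing c with
  | nil => cases hp
  | cons v t ih =>
    by_cases hv : v = p
    · subst hv
      rw [List.erase_cons_head]
      simp only [pvPass, if_true]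
      rw [if_pos (show c v + 1 > 0 by omega)]
      exact pvPass_congr _ _ _ (fun x => by
        by_cases hx : x = v
        · simp only [if_pos hx]; omega
        · simp only [if_neg hx])
    · rw [List.erase_cons_tail (by simpa using fun h => hv h)]
      have hpt : p ∈ t := by
        cases hp with
        | head => exact absurd rfl hv
        | tail _ h => exact h
      simp only [pvPass, if_neg hv]
      by_cases hcv : c v > 0
      · rw [if_pos hcv, if_pos hcv]
        rw [pvPass_congr t _ (fun x => if x = p then (fun y => if y = v then c y - 1 else c y) x + 1 else (fun y => if y = v then c y - 1 else c y) x)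
            (fun x => by by_cases hx : x = p <;> by_cases hxv : x = v <;> simp [hx, hxv] <;> omega)]
        exact ih _ hpt (by simp [Ne.symm hv]; omega)
      · rw [if_neg hcv, if_neg hcv, ih _ hpt hc]

-- A's pop(index(p)) step is List.erase
theorem pvAStep_eq_erase (cur : List Int) (p : Int) :
    (match PySem.List.index? cur p with
      | some i =>
        match PySem.List.pop? cur (i : Int) with
        | some r => r.2
        | none => cur
      | none => cur) = cur.erase p := by
  rw [List.erase_eq_eraseIdx, ← PySem.List.index?_eq_idxOf?]
  cases hidx : PySem.List.index? cur p with
  | none => rfl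
  | some i =>
    obtain ⟨hk, -, -⟩ := PySem.List.getElem_of_index?_eq_some hidx
    simp [PySem.List.pop?_natCast cur i hk]

-- MAIN: folding erase over ps = one counting pass
theorem pvFold_erase_eq_pass (ps l : List Int) (h : ∀ v, ps.count v ≤ l.count v) :
    ps.foldl (fun cur popper => cur.erase popper) l
      = pvPass (fun v => (ps.count v : Int)) l := by
  induction ps generalizing l with
  | nil => simp [pvPass_zero]
  | cons p ps ih =>
    have hpl : p ∈ l := by
      have := h p
      simp [List.count_cons_self] at this
      exact List.count_pos_iff.mp (by omega)
    simp only [List.foldl_cons]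
    rw [ih (l.erase p) (fun v => by
      by_cases hv : v = p
      · subst hv
        have h1 := h v
        have h2 : List.count v (l.erase v) = List.count v l - 1 := List.count_erase_self
        simp at h1
        omega
      · have h1 := h v
        rw [List.count_erase_of_ne hv]
        simp [List.count_cons] at h1
        omega)]
    rw [← pvPass_inc l _ p hpl (by positivity)]
    exact pvPass_congr _ _ _ (fun v => by
      by_cases hv : v = p <;> simp [hv, List.count_cons] <;> omega)

-- ===== bridging A's to_pop loop to pvMk =====
theorem pvA_toPop_from (l : List Int) (i : Nat) (h1 : 1 ≤ i) (h2 : i ≤ l.length) (acc : List Int) :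
    (PySem.List.pyRange (i : Int) (l.length : Int) 1).foldl
      (fun acc idx =>
        if PySem.List.pyGetD l idx 0 - PySem.List.pyGetD l (idx - 1) 0 = 1 then
          acc ++ [PySem.List.pyGetD l idx 0]
        else acc) acc
    = acc ++ pvGo (l.getD (i - 1) 0) (l.drop i) := by
  by_cases hlt : i < l.length
  · rw [PySem.List.pyRange_one_cons (by exact_mod_cast hlt)]
    have hcast : ((i : Int) + 1) = ((i + 1 : Nat) : Int) := by push_cast; ring
    have hdrop : l.drop i = l[i] :: l.drop (i + 1) := by
      rw [List.drop_eq_getElem_cons hlt]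
    have hget1 : PySem.List.pyGetD l (i : Int) 0 = l[i] := by
      rw [PySem.List.pyGetD_natCast]
      simp [List.getD, List.getElem?_eq_getElem hlt]
    have hget0 : PySem.List.pyGetD l ((i : Int) - 1) 0 = l.getD (i - 1) 0 := by
      have : ((i : Int) - 1) = ((i - 1 : Nat) : Int) := by omega
      rw [this, PySem.List.pyGetD_natCast]
    simp only [List.foldl_cons, hget1, hget0]
    rw [hcast, pvA_toPop_from l (i + 1) (by omega) (by omega)]
    have : l.getD ((i + 1) - 1) 0 = l[i] := by
      simp [List.getD, List.getElem?_eq_getElem hlt]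
    rw [this, hdrop]
    simp only [pvGo]
    split <;> simp
  · have hi : i = l.length := by omega
    subst hi
    rw [PySem.List.pyRange_one_eq_nil (by omega)]
    simp [pvGo]
termination_by l.length - i

theorem pvA_toPop (l : List Int) :
    (PySem.List.pyRange 1 (l.length : Int) 1).foldl
      (fun acc idx =>
        if PySem.List.pyGetD l idx 0 - PySem.List.pyGetD l (idx - 1) 0 = 1 then
          acc ++ [PySem.List.pyGetD l idx 0]
        else acc) []
    = pvMk l := by
  cases l with
  | nil => rw [PySem.List.pyRange_one_eq_nil (by simp)]; rfl
  | cons a t =>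
    have := pvA_toPop_from (a :: t) 1 le_rfl (by simp) []
    simpa [pvMk] using this

-- ===== bridging B's loops =====
theorem pvB_count (t : List Int) (prev : Int) (d : PySem.Dict Int Int) (v : Int) :
    ((t.foldl
      (fun (s : PySem.Dict Int Int × Option Int) v =>
        let counts :=
          match s.2 with
          | some p => if v - p = 1 then s.1.insert v (s.1.getD v 0 + 1) else s.1
          | none => s.1
        (counts, some v))
      (d, some prev)).1).getD v 0 = d.getD v 0 + ((pvGo prev t).count v : Int) := by
  induction t generalizing prev d with
  | nil => simp [pvGo]
  | cons x t ih =>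
    simp only [List.foldl_cons, pvGo]
    by_cases hx : x - prev = 1
    · rw [if_pos hx, ih, PySem.Dict.getD_insert]
      by_cases hv : v = x
      · subst hv; simp [hx]; ring
      · simp [hv, hx, List.count_cons]
        omega
    · rw [if_neg hx, ih]
      simp [hx]

theorem pvB_pass (t : List Int) (d : PySem.Dict Int Int) (c : Int → Int)
    (hc : ∀ v, d.getD v 0 = c v) (kept : List Int) :
    (t.foldl
      (fun (s : PySem.Dict Int Int × List Int) v =>
        if s.1.getD v 0 > 0 then (s.1.insert v (s.1.getD v 0 - 1), s.2)
        else (s.1, s.2 ++ [v]))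
      (d, kept)).2 = kept ++ pvPass c t := by
  induction t generalizing d c kept with
  | nil => simp [pvPass]
  | cons v t ih =>
    simp only [List.foldl_cons, pvPass, hc v]
    by_cases hv : c v > 0
    · rw [if_pos hv, if_pos hv]
      exact ih _ _ (fun x => by rw [PySem.Dict.getD_insert]; by_cases hx : x = v <;> simp [hx, hc x]) kept
    · rw [if_neg hv, if_neg hv, ih _ _ hc]
      simp

theorem pvB_eq (l : List Int) :
    pop_between_verses_alt l = pvPass (fun v => ((pvMk l).count v : Int)) l := by
  cases l with
  | nil => rfl
  | cons a t =>
    show (List.foldl _ ((List.foldl _ (_, some a) t).1, []) (a :: t)).2 = _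
    rw [pvB_pass (a :: t) _ (fun v => ((pvMk (a :: t)).count v : Int))
      (fun v => by rw [pvB_count t a PySem.Dict.empty v]; simp [pvMk]) []]
    simp

theorem pvA_eq (l : List Int) :
    pop_between_verses l = pvPass (fun v => ((pvMk l).count v : Int)) l := by
  show ((PySem.List.pyRange 1 (l.length : Int) 1).foldl _ []).reverse.foldl _ l = _
  rw [pvA_toPop l]
  have hstep : ∀ (init : List Int),
      (pvMk l).reverse.foldl
        (fun cur popper =>
          match PySem.List.index? cur popper with
          | some i =>
            match PySem.List.pop? cur (i : Int) with
            | some r => r.2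
            | none => cur
          | none => cur) init
      = (pvMk l).reverse.foldl (fun cur popper => cur.erase popper) init := by
    intro init
    exact PySem.List.foldl_congr_mem _ _ _ init (fun cur popper _ => pvAStep_eq_erase cur popper)
  rw [hstep l, pvFold_erase_eq_pass _ _ (fun v => by
    rw [List.count_reverse]; exact pvMk_count_le l v)]
  exact pvPass_congr _ _ _ (fun v => by rw [List.count_reverse])

-- ===== VERDICT (by name: the statement is the Claim_ definition above) =====
theorem pop_between_verses_spec : Claim_equal_pop_between_verses := by
  intro l _
  show pop_between_verses l = pop_between_verses_alt l
  rw [pvA_eq, pvB_eq]
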